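-- pv_equiv track=rewrite | github.com/Coreenee/algorithm-study | tuuuuuuuna/자물쇠와 열쇠.py | is_open
-- ===== SOURCE A (Python) =====
-- import copy
--
-- def LockPlusKey(key,lock,start_x,start_y):
--     size_key = len(key)
--     new_lock = copy.deepcopy(lock)
--     for i in range(size_key):
--         for j in range(size_key):
--             if 0<=(start_x+j)<len(lock) and 0<= (start_y+i) <len(lock):
--                 new_lock[start_x+j][start_y+i] += key[j][i]
--     return new_lock
--
-- def is_open(key,lock):
--     TF_list=[]
--     size_lock = len(lock)
--     size_key = len(key)
--     max_size = size_lock - size_key + 1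
--     for i in range(1-size_key, size_lock+size_key):
--         for j in range(1-size_key, size_lock+size_key):
--             checker=1
--             new_lock = LockPlusKey(key,lock,i,j)
--             for k in range(size_lock):
--                 for l in range(size_lock):
--                     checker *= new_lock[k][l]
--             TF_list.append(checker)
--     return TF_list
-- ===== SOURCE B (Python) =====
-- def is_open(key, lock):
--     L = len(lock)
--     K = len(key)
--     zeros = 0
--     nz_prod = 1
--     for x in range(L):
--         for y in range(L):
--             v = lock[x][y]
--             if v == 0:
--                 zeros += 1
--             else:
--                 nz_prod *= v
--     res = []
--     for i in range(1 - K, L + K):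
--         for j in range(1 - K, L + K):
--             zloc = 0
--             den = 1
--             num = 1
--             for dx in range(K):
--                 for dy in range(K):
--                     x = i + dx
--                     y = j + dy
--                     if 0 <= x < L and 0 <= y < L:
--                         v = lock[x][y]
--                         if v == 0:
--                             zloc += 1
--                         else:
--                             den *= v
--                         num *= v + key[dx][dy]
--             if zeros > zloc:
--                 res.append(0)
--             else:
--                 res.append(nz_prod // den * num)
--     return res
-- ===== Notes on version B (the rewrite author's own statement) =====
-- stated objective: faster
-- what changed: Instead of deep-copying the lock and re-multiplying all L*L cells for every of the (L+2K-1)^2 key positions, B precomputes the lock's zero-count and nonzero-cell product once and, per position, scans only the <=K^2 overlapped cells, dividing out their original nonzero values and multiplying in the shifted ones (0 if any zero remains outside the overlap).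
import Mathlib
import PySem

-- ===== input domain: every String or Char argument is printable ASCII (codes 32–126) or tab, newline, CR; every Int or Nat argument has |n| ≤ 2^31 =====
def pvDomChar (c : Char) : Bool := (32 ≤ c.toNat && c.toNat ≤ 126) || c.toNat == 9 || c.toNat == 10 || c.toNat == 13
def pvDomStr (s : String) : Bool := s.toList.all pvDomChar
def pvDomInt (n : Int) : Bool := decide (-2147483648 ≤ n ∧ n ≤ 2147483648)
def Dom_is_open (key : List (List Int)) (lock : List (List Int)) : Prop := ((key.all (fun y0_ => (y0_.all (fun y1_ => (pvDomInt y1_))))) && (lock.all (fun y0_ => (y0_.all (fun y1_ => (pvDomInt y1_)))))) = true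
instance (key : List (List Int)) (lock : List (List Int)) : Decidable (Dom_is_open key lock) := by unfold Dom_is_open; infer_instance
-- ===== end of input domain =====

-- B replaces A's per-offset deepcopy + full-grid product by a precomputed zero-count /
-- nonzero-product of the lock plus a per-offset scan of only the ≤ K² overlapped cells
-- (objective: faster, by an asymptotic reduction in per-position work).

-- shared cell accessor: m[x][y]; indices are in range wherever either Python reads
-- (out-of-range reads raise IndexError in Python and are excluded by Pre_is_open)
def getc (m : List (List Int)) (x y : Nat) : Int := (m.getD x []).getD y 0

-- ===== PORT A =====
def lockPlusKey (key : List (List Int)) (lock : List (List Int)) (sx sy : Int) : List (List Int) :=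
  let sk := key.length
  (List.range sk).foldl (fun nl (i : Nat) =>
    (List.range sk).foldl (fun nl (j : Nat) =>
      if 0 ≤ sx + (j:Int) ∧ sx + (j:Int) < (lock.length:Int) ∧ 0 ≤ sy + (i:Int) ∧ sy + (i:Int) < (lock.length:Int) then
        nl.modify (sx + (j:Int)).toNat (fun row => row.modify (sy + (i:Int)).toNat (fun v => v + getc key j i))
      else nl) nl) lock

def is_open (key : List (List Int)) (lock : List (List Int)) : List Int :=
  let sl := lock.length
  let sk := key.length
  (PySem.List.pyRange (1 - (sk:Int)) ((sl:Int) + (sk:Int)) 1).foldl (fun tf i =>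
    (PySem.List.pyRange (1 - (sk:Int)) ((sl:Int) + (sk:Int)) 1).foldl (fun tf j =>
      let newLock := lockPlusKey key lock i j
      let checker := (List.range sl).foldl (fun c k =>
        (List.range sl).foldl (fun c l => c * getc newLock k l) c) 1
      tf ++ [checker]) tf) []

-- ===== PORT B =====
def is_open_alt (key : List (List Int)) (lock : List (List Int)) : List Int :=
  let L := lock.length
  let K := key.length
  let zp : Int × Int := (List.range L).foldl (fun s x =>
    (List.range L).foldl (fun s y =>
      let v := getc lock x y
      if v = 0 then (s.1 + 1, s.2) else (s.1, s.2 * v)) s) (0, 1)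
  (PySem.List.pyRange (1 - (K:Int)) ((L:Int) + (K:Int)) 1).foldl (fun res i =>
    (PySem.List.pyRange (1 - (K:Int)) ((L:Int) + (K:Int)) 1).foldl (fun res j =>
      let t : Int × Int × Int := (List.range K).foldl (fun t (dx : Nat) =>
        (List.range K).foldl (fun t (dy : Nat) =>
          let x := i + (dx:Int)
          let y := j + (dy:Int)
          if 0 ≤ x ∧ x < (L:Int) ∧ 0 ≤ y ∧ y < (L:Int) then
            let v := getc lock x.toNat y.toNat
            ((if v = 0 then t.1 + 1 else t.1),
             (if v = 0 then t.2.1 else t.2.1 * v),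
             t.2.2 * (v + getc key dx dy))
          else t) t) (0, 1, 1)
      if zp.1 > t.1 then res ++ [0]
      else res ++ [PySem.Int.floordiv zp.2 t.2.1 * t.2.2]) res) []

-- ===== PRECONDITION & SPEC =====
-- Pre_ excludes exactly the ragged inputs on which the Python A raises IndexError:
-- a lock row shorter than len(lock), or (when the lock is nonempty) a key row shorter than len(key).
def Pre_is_open (key : List (List Int)) (lock : List (List Int)) : Prop :=
  (∀ row ∈ lock, lock.length ≤ row.length) ∧
  (lock.length = 0 ∨ ∀ row ∈ key, key.length ≤ row.length)
instance (key : List (List Int)) (lock : List (List Int)) : Decidable (Pre_is_open key lock) := by unfold Pre_is_open; infer_instance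
def pvWitness_is_open : List (List Int) × List (List Int) := ([[0]], [[1]])

def Spec_is_open (key : List (List Int)) (lock : List (List Int)) (out : List Int) : Prop := out = is_open_alt key lock
instance (key : List (List Int)) (lock : List (List Int)) (out : List Int) : Decidable (Spec_is_open key lock out) := by unfold Spec_is_open; infer_instance

-- ===== CLAIM (what is proved, stated in full; the proofs are below) =====
def Claim_equal_is_open : Prop := ∀ (key : List (List Int)) (lock : List (List Int)), Dom_is_open key lock → Pre_is_open key lock → Spec_is_open key lock (is_open key lock)

-- ===== LEMMAS AND PROOFS =====

-- the list of grid cells (a,b), a < n, b < m, in row-major order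
def cellsOf (n m : Nat) : List (Nat × Nat) :=
  (List.range n).flatMap (fun a => (List.range m).map (fun b => (a, b)))

lemma foldl_flatMap_map {σ α β : Type} (l₁ : List α) (l₂ : List β) (f : σ → α → β → σ) (s : σ) :
    l₁.foldl (fun s a => l₂.foldl (fun s b => f s a b) s) s
      = (l₁.flatMap (fun a => l₂.map (fun b => (a, b)))).foldl (fun s p => f s p.1 p.2) s := by
  induction l₁ generalizing s with
  | nil => rfl
  | cons a l ih => simp [List.foldl_append, List.foldl_map, ih]

lemma mem_cellsOf {n m : Nat} {p : Nat × Nat} : p ∈ cellsOf n m ↔ p.1 < n ∧ p.2 < m := by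
  obtain ⟨a, b⟩ := p
  simp [cellsOf, List.mem_flatMap, List.mem_map, List.mem_range, eq_comm, and_comm]

lemma nodup_cellsOf (n m : Nat) : (cellsOf n m).Nodup := by
  unfold cellsOf
  rw [List.nodup_flatMap]
  constructor
  · intro x _
    exact (List.nodup_range).map (fun a b h => congrArg Prod.snd h)
  · refine List.Pairwise.imp ?_ (List.pairwise_lt_range (n := n))
    intro a b hab p hp hq
    obtain ⟨x, y⟩ := p
    simp [List.mem_map] at hp hq
    omega

lemma foldl_mul_eq {α : Type} (F : α → Int) (l : List α) (c : Int) :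
    l.foldl (fun acc x => acc * F x) c = c * (l.map F).prod := by
  induction l generalizing c with
  | nil => simp
  | cons a l ih => simp [ih, mul_assoc]

lemma sum_filter_none {α : Type} (l : List α) (q : α → Bool) (f : α → Int)
    (h : ∀ p ∈ l, q p = false) :
    ((l.filter q).map f).sum = 0 := by
  rw [List.filter_eq_nil_iff.2 (by intro a ha; simp [h a ha])]
  rfl

lemma sum_filter_unique {α : Type} [DecidableEq α] (l : List α) (q : α → Bool) (p₀ : α)
    (f : α → Int) (hnd : l.Nodup) (hmem : p₀ ∈ l) (hq : q p₀ = true)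
    (huni : ∀ p ∈ l, q p = true → p = p₀) :
    ((l.filter q).map f).sum = f p₀ := by
  induction l with
  | nil => simp at hmem
  | cons a l ih =>
    rcases List.nodup_cons.1 hnd with ⟨hna, hndl⟩
    by_cases hap : a = p₀
    · subst hap
      rw [List.filter_cons_of_pos hq]
      have : l.filter q = [] := List.filter_eq_nil_iff.2 (fun b hb hqb => hna (huni b (List.mem_cons_of_mem _ hb) hqb ▸ hb))
      simp [this]
    · have hqa : q a = false := by
        by_contra h
        exact hap (huni a List.mem_cons_self (by simpa using h))
      rw [List.filter_cons_of_neg (by simp [hqa])]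
      have hm : p₀ ∈ l := by
        rcases List.mem_cons.1 hmem with h | h
        · exact absurd h.symm hap
        · exact h
      exact ih hndl hm (fun p hp hqp => huni p (List.mem_cons_of_mem _ hp) hqp)

-- ---- characterizing A's lockPlusKey: original cell plus the matching key entry ----

def updA (key lock : List (List Int)) (sx sy : Int) (nl : List (List Int)) (p : Nat × Nat) : List (List Int) :=
  if 0 ≤ sx + (p.2:Int) ∧ sx + (p.2:Int) < (lock.length:Int) ∧ 0 ≤ sy + (p.1:Int) ∧ sy + (p.1:Int) < (lock.length:Int) then
    nl.modify (sx + (p.2:Int)).toNat (fun row => row.modify (sy + (p.1:Int)).toNat (fun v => v + getc key p.2 p.1))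
  else nl

def hitB (lock : List (List Int)) (sx sy : Int) (x y : Nat) (p : Nat × Nat) : Bool :=
  decide (0 ≤ sx + (p.2:Int) ∧ sx + (p.2:Int) < (lock.length:Int) ∧ 0 ≤ sy + (p.1:Int) ∧ sy + (p.1:Int) < (lock.length:Int) ∧ (sx + (p.2:Int)).toNat = x ∧ (sy + (p.1:Int)).toNat = y)

def addSum (key lock : List (List Int)) (sx sy : Int) (l : List (Nat × Nat)) (x y : Nat) : Int :=
  ((l.filter (hitB lock sx sy x y)).map (fun p => getc key p.2 p.1)).sum

lemma lockPlusKey_eq (key lock : List (List Int)) (sx sy : Int) :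
    lockPlusKey key lock sx sy
      = (cellsOf key.length key.length).foldl (updA key lock sx sy) lock := by
  unfold lockPlusKey cellsOf
  rw [foldl_flatMap_map (List.range key.length) (List.range key.length)
    (fun nl (i j : Nat) =>
      if 0 ≤ sx + (j:Int) ∧ sx + (j:Int) < (lock.length:Int) ∧ 0 ≤ sy + (i:Int) ∧ sy + (i:Int) < (lock.length:Int) then
        nl.modify (sx + (j:Int)).toNat (fun row => row.modify (sy + (i:Int)).toNat (fun v => v + getc key j i))
      else nl) lock]
  rfl

lemma getD_modify (s : List (List Int)) (X x : Nat) (g : List Int → List Int) :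
    (s.modify X g).getD x [] = if X = x ∧ x < s.length then g (s.getD x []) else s.getD x [] := by
  rw [List.getD_eq_getElem?_getD, List.getD_eq_getElem?_getD, List.getElem?_modify]
  by_cases hx : x < s.length
  · rw [List.getElem?_eq_getElem hx]
    by_cases hXx : X = x <;> simp [hXx, hx, List.getD_eq_getElem?_getD, List.getElem?_eq_getElem hx]
  · rw [List.getElem?_eq_none (by omega)]
    simp [hx]

lemma getDInt_modify (r : List Int) (Y y : Nat) (f : Int → Int) :
    (r.modify Y f).getD y 0 = if Y = y ∧ y < r.length then f (r.getD y 0) else r.getD y 0 := by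
  rw [List.getD_eq_getElem?_getD, List.getD_eq_getElem?_getD, List.getElem?_modify]
  by_cases hy : y < r.length
  · rw [List.getElem?_eq_getElem hy]
    by_cases hYy : Y = y <;> simp [hYy, hy, List.getD_eq_getElem?_getD, List.getElem?_eq_getElem hy]
  · rw [List.getElem?_eq_none (by omega)]
    simp [hy]

lemma getc_modify2 (s : List (List Int)) (X Y x y : Nat) (f : Int → Int)
    (hX : X < s.length) (hY : Y < (s.getD X []).length) :
    getc (s.modify X (fun r => r.modify Y f)) x y
      = if X = x ∧ Y = y then f (getc s x y) else getc s x y := by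
  unfold getc
  by_cases hXx : X = x
  · subst hXx
    rw [getD_modify, if_pos ⟨rfl, hX⟩, getDInt_modify]
    by_cases hYy : Y = y
    · subst hYy; rw [if_pos ⟨rfl, hY⟩, if_pos ⟨rfl, rfl⟩]
    · rw [if_neg (fun h => hYy h.1), if_neg (fun h => hYy h.2)]
  · rw [getD_modify, if_neg (fun h => hXx h.1), if_neg (fun h => hXx h.1)]

lemma shape_modify (s : List (List Int)) (X Y : Nat) (f : Int → Int) (t : Nat) :
    ((s.modify X (fun r => r.modify Y f)).getD t []).length = (s.getD t []).length := by
  rw [getD_modify]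
  split
  · rw [List.length_modify]
  · rfl

lemma shape_updA (key lock : List (List Int)) (sx sy : Int) (s : List (List Int)) (p : Nat × Nat)
    (hlen : s.length = lock.length) :
    (updA key lock sx sy s p).length = lock.length ∧
    ∀ t, ((updA key lock sx sy s p).getD t []).length = (s.getD t []).length := by
  unfold updA
  split
  · exact ⟨by rw [List.length_modify]; exact hlen, fun t => shape_modify _ _ _ _ t⟩
  · exact ⟨hlen, fun _ => rfl⟩

lemma getc_updA (key lock : List (List Int)) (sx sy : Int) (s : List (List Int)) (p : Nat × Nat)
    (hlen : s.length = lock.length)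
    (hrow : ∀ t, ((s.getD t []).length = ((lock.getD t []).length)))
    (hWide : ∀ row ∈ lock, lock.length ≤ row.length)
    (x y : Nat) (hx : x < lock.length) (hy : y < lock.length) :
    getc (updA key lock sx sy s p) x y
      = getc s x y + (if hitB lock sx sy x y p then getc key p.2 p.1 else 0) := by
  unfold updA hitB
  by_cases hg : 0 ≤ sx + (p.2:Int) ∧ sx + (p.2:Int) < (lock.length:Int) ∧ 0 ≤ sy + (p.1:Int) ∧ sy + (p.1:Int) < (lock.length:Int)
  · rw [if_pos hg]
    have hXlt : (sx + (p.2:Int)).toNat < s.length := by omega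
    have hrl : lock.length ≤ (lock.getD (sx + (p.2:Int)).toNat []).length := by
      have : lock.getD (sx + (p.2:Int)).toNat [] ∈ lock := by
        rw [List.getD_eq_getElem _ _ (by omega)]
        exact List.getElem_mem _
      exact hWide _ this
    have hYlt : (sy + (p.1:Int)).toNat < (s.getD (sx + (p.2:Int)).toNat []).length := by
      rw [hrow]; omega
    rw [getc_modify2 s _ _ x y _ hXlt hYlt]
    have hiff : (decide (0 ≤ sx + (p.2:Int) ∧ sx + (p.2:Int) < (lock.length:Int) ∧ 0 ≤ sy + (p.1:Int) ∧ sy + (p.1:Int) < (lock.length:Int) ∧ (sx + (p.2:Int)).toNat = x ∧ (sy + (p.1:Int)).toNat = y) = true)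
        ↔ ((sx + (p.2:Int)).toNat = x ∧ (sy + (p.1:Int)).toNat = y) := by
      simp only [decide_eq_true_eq]
      exact ⟨fun h => ⟨h.2.2.2.2.1, h.2.2.2.2.2⟩,
             fun h => ⟨hg.1, hg.2.1, hg.2.2.1, hg.2.2.2, h.1, h.2⟩⟩
    by_cases hh : (sx + (p.2:Int)).toNat = x ∧ (sy + (p.1:Int)).toNat = y
    · rw [if_pos hh, if_pos (hiff.2 hh)]
    · rw [if_neg hh, if_neg (fun h => hh (hiff.1 h)), add_zero]
  · have hnf : (decide (0 ≤ sx + (p.2:Int) ∧ sx + (p.2:Int) < (lock.length:Int) ∧ 0 ≤ sy + (p.1:Int) ∧ sy + (p.1:Int) < (lock.length:Int) ∧ (sx + (p.2:Int)).toNat = x ∧ (sy + (p.1:Int)).toNat = y) = true) → False := by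
      simp only [decide_eq_true_eq]
      exact fun h => hg ⟨h.1, h.2.1, h.2.2.1, h.2.2.2.1⟩
    rw [if_neg hg, if_neg hnf, add_zero]

lemma getc_foldA (key lock : List (List Int)) (sx sy : Int)
    (hWide : ∀ row ∈ lock, lock.length ≤ row.length)
    (l : List (Nat × Nat)) (s : List (List Int))
    (hlen : s.length = lock.length)
    (hrow : ∀ t, ((s.getD t []).length = ((lock.getD t []).length)))
    (x y : Nat) (hx : x < lock.length) (hy : y < lock.length) :
    getc (l.foldl (updA key lock sx sy) s) x y
      = getc s x y + addSum key lock sx sy l x y := by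
  induction l generalizing s with
  | nil => simp [addSum]
  | cons p l ih =>
    obtain ⟨h1, h2⟩ := shape_updA key lock sx sy s p hlen
    rw [List.foldl_cons, ih (updA key lock sx sy s p) h1 (fun t => (h2 t).trans (hrow t)),
      getc_updA key lock sx sy s p hlen hrow hWide x y hx hy]
    unfold addSum
    by_cases hp : hitB lock sx sy x y p
    · rw [List.filter_cons_of_pos hp, if_pos hp]
      simp; ring
    · rw [List.filter_cons_of_neg (by simpa using hp), if_neg hp]
      simp

-- ---- characterizing B's folds ----

def inbB (lock : List (List Int)) (i j : Int) (p : Nat × Nat) : Bool :=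
  decide (0 ≤ i + (p.1:Int) ∧ i + (p.1:Int) < (lock.length:Int) ∧ 0 ≤ j + (p.2:Int) ∧ j + (p.2:Int) < (lock.length:Int))
def phif (i j : Int) (p : Nat × Nat) : Nat × Nat := ((i + (p.1:Int)).toNat, (j + (p.2:Int)).toNat)
def zcell (lock : List (List Int)) (c : Nat × Nat) : Bool := decide (getc lock c.1 c.2 = 0)
def ovB (K : Nat) (i j : Int) (c : Nat × Nat) : Bool :=
  decide (i ≤ (c.1:Int) ∧ (c.1:Int) < i + (K:Int) ∧ j ≤ (c.2:Int) ∧ (c.2:Int) < j + (K:Int))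

lemma pair_char (lock : List (List Int)) (l : List (Nat × Nat)) (s0 : Int × Int) :
    l.foldl (fun s c =>
      if getc lock c.1 c.2 = 0 then (s.1 + 1, s.2) else (s.1, s.2 * getc lock c.1 c.2)) s0
    = (s0.1 + ((l.countP (zcell lock) : Nat) : Int),
       s0.2 * ((l.filter (fun c => !zcell lock c)).map (fun c => getc lock c.1 c.2)).prod) := by
  induction l generalizing s0 with
  | nil => simp
  | cons c l ih =>
    rw [List.foldl_cons, ih]
    by_cases hz : getc lock c.1 c.2 = 0
    · refine Prod.ext ?_ ?_
      · simp [List.countP_cons, zcell, hz]; push_cast; ring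
      · simp [List.filter_cons, zcell, hz]
    · refine Prod.ext ?_ ?_
      · simp [List.countP_cons, zcell, hz]
      · simp [List.filter_cons, zcell, hz]; ring

lemma triple_char (key lock : List (List Int)) (i j : Int) (l : List (Nat × Nat)) (t0 : Int × Int × Int) :
    l.foldl (fun t p =>
      if 0 ≤ i + (p.1:Int) ∧ i + (p.1:Int) < (lock.length:Int) ∧ 0 ≤ j + (p.2:Int) ∧ j + (p.2:Int) < (lock.length:Int) then
        ((if getc lock (i + (p.1:Int)).toNat (j + (p.2:Int)).toNat = 0 then t.1 + 1 else t.1),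
         (if getc lock (i + (p.1:Int)).toNat (j + (p.2:Int)).toNat = 0 then t.2.1 else t.2.1 * getc lock (i + (p.1:Int)).toNat (j + (p.2:Int)).toNat),
         t.2.2 * (getc lock (i + (p.1:Int)).toNat (j + (p.2:Int)).toNat + getc key p.1 p.2))
      else t) t0
    = (t0.1 + (((l.filter (inbB lock i j)).countP (fun p => zcell lock (phif i j p)) : Nat) : Int),
       t0.2.1 * (((l.filter (inbB lock i j)).filter (fun p => !zcell lock (phif i j p))).map (fun p => getc lock (phif i j p).1 (phif i j p).2)).prod,
       t0.2.2 * ((l.filter (inbB lock i j)).map (fun p => getc lock (phif i j p).1 (phif i j p).2 + getc key p.1 p.2)).prod) := by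
  induction l generalizing t0 with
  | nil => simp
  | cons p l ih =>
    rw [List.foldl_cons, ih]
    by_cases hin : 0 ≤ i + (p.1:Int) ∧ i + (p.1:Int) < (lock.length:Int) ∧ 0 ≤ j + (p.2:Int) ∧ j + (p.2:Int) < (lock.length:Int)
    · rw [if_pos hin]
      by_cases hz : getc lock (i + (p.1:Int)).toNat (j + (p.2:Int)).toNat = 0
      · refine Prod.ext ?_ (Prod.ext ?_ ?_)
        · simp [List.filter_cons, inbB, hin, List.countP_cons, zcell, phif, hz]; push_cast; ring
        · simp [List.filter_cons, inbB, hin, zcell, phif, hz]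
        · simp [List.filter_cons, inbB, hin, phif, hz]; ring
      · refine Prod.ext ?_ (Prod.ext ?_ ?_)
        · simp [if_neg hz, List.filter_cons, inbB, hin, List.countP_cons, zcell, phif, hz]
        · simp [if_neg hz, List.filter_cons, inbB, hin, zcell, phif, hz]; ring
        · simp [if_neg hz, List.filter_cons, inbB, hin, phif]; ring
    · rw [if_neg hin]
      refine Prod.ext ?_ (Prod.ext ?_ ?_) <;> simp [List.filter_cons, inbB, hin]

-- the overlapped grid cells are exactly the image of the in-range key offsets
lemma S_perm (lock : List (List Int)) (K : Nat) (i j : Int) :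
    ((cellsOf lock.length lock.length).filter (ovB K i j)).Perm
      (((cellsOf K K).filter (inbB lock i j)).map (phif i j)) := by
  refine (List.perm_ext_iff_of_nodup ((nodup_cellsOf _ _).filter _) ?_).2 ?_
  · refine ((nodup_cellsOf K K).filter _).map_on ?_
    intro p hp q hq hpq
    have hp' := List.of_mem_filter hp
    have hq' := List.of_mem_filter hq
    simp only [inbB, decide_eq_true_eq] at hp' hq'
    obtain ⟨a, b⟩ := p; obtain ⟨a', b'⟩ := q
    simp only [phif, Prod.mk.injEq] at hpq ⊢
    omega
  · intro c
    constructor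
    · intro hmem
      obtain ⟨hcell, hov⟩ := List.mem_filter.1 hmem
      obtain ⟨hx, hy⟩ := mem_cellsOf.1 hcell
      simp only [ovB, decide_eq_true_eq] at hov
      refine List.mem_map.2 ⟨(((c.1:Int) - i).toNat, ((c.2:Int) - j).toNat),
        List.mem_filter.2 ⟨mem_cellsOf.2 ⟨?_, ?_⟩, ?_⟩, ?_⟩
      · omega
      · omega
      · simp only [inbB, decide_eq_true_eq]
        omega
      · simp only [phif]
        refine Prod.ext ?_ ?_ <;> simp only [] <;> omega
    · intro hmem
      obtain ⟨p, hp, hphi⟩ := List.mem_map.1 hmem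
      obtain ⟨hpcell, hpin⟩ := List.mem_filter.1 hp
      obtain ⟨hp1, hp2⟩ := mem_cellsOf.1 hpcell
      simp only [inbB, decide_eq_true_eq] at hpin
      refine List.mem_filter.2 ⟨mem_cellsOf.2 ⟨?_, ?_⟩, ?_⟩
      · rw [← hphi]; simp only [phif]; omega
      · rw [← hphi]; simp only [phif]; omega
      · rw [← hphi]
        simp only [ovB, phif, decide_eq_true_eq]
        omega

-- ---- per-offset value equality ----

def chkA (key lock : List (List Int)) (i j : Int) : Int :=
  let newLock := lockPlusKey key lock i j
  (List.range lock.length).foldl (fun c k =>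
    (List.range lock.length).foldl (fun c l => c * getc newLock k l) c) 1

def zpB (lock : List (List Int)) : Int × Int :=
  (List.range lock.length).foldl (fun s x =>
    (List.range lock.length).foldl (fun s y =>
      let v := getc lock x y
      if v = 0 then (s.1 + 1, s.2) else (s.1, s.2 * v)) s) (0, 1)

def tB (key lock : List (List Int)) (i j : Int) : Int × Int × Int :=
  (List.range key.length).foldl (fun t (dx : Nat) =>
    (List.range key.length).foldl (fun t (dy : Nat) =>
      let x := i + (dx:Int)
      let y := j + (dy:Int)
      if 0 ≤ x ∧ x < (lock.length:Int) ∧ 0 ≤ y ∧ y < (lock.length:Int) then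
        let v := getc lock x.toNat y.toNat
        ((if v = 0 then t.1 + 1 else t.1),
         (if v = 0 then t.2.1 else t.2.1 * v),
         t.2.2 * (v + getc key dx dy))
      else t) t) (0, 1, 1)

lemma chkA_eq (key lock : List (List Int)) (i j : Int) :
    chkA key lock i j
      = 1 * ((cellsOf lock.length lock.length).map
          (fun c => getc (lockPlusKey key lock i j) c.1 c.2)).prod := by
  unfold chkA cellsOf
  rw [foldl_flatMap_map (List.range lock.length) (List.range lock.length)
    (fun c (k l : Nat) => c * getc (lockPlusKey key lock i j) k l) 1]
  exact foldl_mul_eq _ _ 1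

lemma zpB_eq (lock : List (List Int)) :
    zpB lock = (0 + (((cellsOf lock.length lock.length).countP (zcell lock) : Nat) : Int),
      1 * (((cellsOf lock.length lock.length).filter (fun c => !zcell lock c)).map (fun c => getc lock c.1 c.2)).prod) := by
  unfold zpB cellsOf
  rw [foldl_flatMap_map (List.range lock.length) (List.range lock.length)
    (fun s (x y : Nat) => if getc lock x y = 0 then (s.1 + 1, s.2) else (s.1, s.2 * getc lock x y)) (0, 1)]
  exact pair_char lock _ _

lemma tB_eq (key lock : List (List Int)) (i j : Int) :
    tB key lock i j
      = (0 + (((cellsOf key.length key.length).filter (inbB lock i j)).countP (fun p => zcell lock (phif i j p)) : Int),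
         1 * ((((cellsOf key.length key.length).filter (inbB lock i j)).filter (fun p => !zcell lock (phif i j p))).map (fun p => getc lock (phif i j p).1 (phif i j p).2)).prod,
         1 * (((cellsOf key.length key.length).filter (inbB lock i j)).map (fun p => getc lock (phif i j p).1 (phif i j p).2 + getc key p.1 p.2)).prod) := by
  unfold tB cellsOf
  rw [foldl_flatMap_map (List.range key.length) (List.range key.length)
    (fun t (dx dy : Nat) =>
      if 0 ≤ i + (dx:Int) ∧ i + (dx:Int) < (lock.length:Int) ∧ 0 ≤ j + (dy:Int) ∧ j + (dy:Int) < (lock.length:Int) then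
        ((if getc lock (i + (dx:Int)).toNat (j + (dy:Int)).toNat = 0 then t.1 + 1 else t.1),
         (if getc lock (i + (dx:Int)).toNat (j + (dy:Int)).toNat = 0 then t.2.1 else t.2.1 * getc lock (i + (dx:Int)).toNat (j + (dy:Int)).toNat),
         t.2.2 * (getc lock (i + (dx:Int)).toNat (j + (dy:Int)).toNat + getc key dx dy))
      else t) (0, 1, 1)]
  exact triple_char key lock i j _ _

lemma prod_ne_zero_int (l : List Int) (h : ∀ x ∈ l, x ≠ 0) : l.prod ≠ 0 :=
  List.prod_ne_zero (fun h0 => h 0 h0 rfl)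

lemma offset_eq (key lock : List (List Int)) (hPre : Pre_is_open key lock) (i j : Int) :
    chkA key lock i j
      = if (zpB lock).1 > (tB key lock i j).1 then 0
        else PySem.Int.floordiv (zpB lock).2 (tB key lock i j).2.1 * (tB key lock i j).2.2 := by
  obtain ⟨hWide, -⟩ := hPre
  have hfnl : ∀ c ∈ cellsOf lock.length lock.length,
      getc (lockPlusKey key lock i j) c.1 c.2
        = getc lock c.1 c.2 + addSum key lock i j (cellsOf key.length key.length) c.1 c.2 := by
    intro c hc
    rw [mem_cellsOf] at hc
    rw [lockPlusKey_eq]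
    exact getc_foldA key lock i j hWide _ lock rfl (fun t => rfl) c.1 c.2 hc.1 hc.2
  have hperm := S_perm lock key.length i j
  rw [chkA_eq, one_mul, tB_eq, zpB_eq]
  dsimp only
  set S := (cellsOf lock.length lock.length).filter (ovB key.length i j) with hS
  set R := (cellsOf lock.length lock.length).filter (fun c => !ovB key.length i j c) with hR
  set Bc := (cellsOf key.length key.length).filter (inbB lock i j) with hBc
  have hsplitperm : (S ++ R).Perm (cellsOf lock.length lock.length) := List.filter_append_perm _ _
  have h1 : ((cellsOf lock.length lock.length).map (fun c => getc (lockPlusKey key lock i j) c.1 c.2)).prod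
      = (S.map (fun c => getc (lockPlusKey key lock i j) c.1 c.2)).prod
        * (R.map (fun c => getc (lockPlusKey key lock i j) c.1 c.2)).prod := by
    rw [← (hsplitperm.map (fun c => getc (lockPlusKey key lock i j) c.1 c.2)).prod_eq,
      List.map_append, List.prod_append]
  have hRmap : R.map (fun c => getc (lockPlusKey key lock i j) c.1 c.2)
      = R.map (fun c => getc lock c.1 c.2) := by
    apply List.map_congr_left
    intro c hc
    have hcg : c ∈ cellsOf lock.length lock.length := (List.mem_filter.1 hc).1
    have hov : ovB key.length i j c = false := by
      have := (List.mem_filter.1 hc).2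
      simpa using this
    have hcg' := mem_cellsOf.1 hcg
    rw [hfnl c hcg]
    have hz : addSum key lock i j (cellsOf key.length key.length) c.1 c.2 = 0 := by
      apply sum_filter_none
      intro p hp
      rw [mem_cellsOf] at hp
      simp only [ovB, decide_eq_false_iff_not] at hov
      simp only [hitB, decide_eq_false_iff_not]
      intro hhit
      exact hov (by omega)
    rw [hz, add_zero]
  have hSmap : (S.map (fun c => getc (lockPlusKey key lock i j) c.1 c.2)).prod
      = (Bc.map (fun p => getc lock (phif i j p).1 (phif i j p).2 + getc key p.1 p.2)).prod := by
    rw [(hperm.map (fun c => getc (lockPlusKey key lock i j) c.1 c.2)).prod_eq, List.map_map]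
    apply congrArg List.prod
    apply List.map_congr_left
    intro p hp
    have hpin : inbB lock i j p = true := (List.mem_filter.1 hp).2
    have hpK := mem_cellsOf.1 (List.mem_filter.1 hp).1
    simp only [inbB, decide_eq_true_eq] at hpin
    have hmemgrid : phif i j p ∈ cellsOf lock.length lock.length :=
      mem_cellsOf.2 ⟨by simp only [phif]; omega, by simp only [phif]; omega⟩
    show getc (lockPlusKey key lock i j) (phif i j p).1 (phif i j p).2 = _
    rw [hfnl _ hmemgrid]
    congr 1
    unfold addSum
    rw [sum_filter_unique (cellsOf key.length key.length) _ (p.2, p.1) _ (nodup_cellsOf _ _)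
      (mem_cellsOf.2 ⟨hpK.2, hpK.1⟩)
      (by simp only [hitB, decide_eq_true_eq]
          refine ⟨hpin.1, hpin.2.1, hpin.2.2.1, hpin.2.2.2, ?_, ?_⟩ <;> rfl)
      (by intro q hq hhit
          rw [mem_cellsOf] at hq
          simp only [hitB, decide_eq_true_eq, phif] at hhit
          obtain ⟨a, b⟩ := q
          simp only [Prod.mk.injEq]
          constructor <;> omega)]
  have hcount : (cellsOf lock.length lock.length).countP (zcell lock)
      = S.countP (zcell lock) + R.countP (zcell lock) := by
    rw [← hsplitperm.countP_eq, List.countP_append]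
  have hSc : S.countP (zcell lock) = Bc.countP (fun p => zcell lock (phif i j p)) := by
    rw [hperm.countP_eq, List.countP_map]
    rfl
  have hden : ((S.filter (fun c => !zcell lock c)).map (fun c => getc lock c.1 c.2)).prod
      = ((Bc.filter (fun p => !zcell lock (phif i j p))).map
          (fun p => getc lock (phif i j p).1 (phif i j p).2)).prod := by
    rw [((hperm.filter _).map (fun c => getc lock c.1 c.2)).prod_eq, List.filter_map, List.map_map]
    rfl
  have hnzP : (((cellsOf lock.length lock.length).filter (fun c => !zcell lock c)).map (fun c => getc lock c.1 c.2)).prod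
      = ((S.filter (fun c => !zcell lock c)).map (fun c => getc lock c.1 c.2)).prod
        * ((R.filter (fun c => !zcell lock c)).map (fun c => getc lock c.1 c.2)).prod := by
    rw [← ((hsplitperm.filter _).map (fun c => getc lock c.1 c.2)).prod_eq,
      List.filter_append, List.map_append, List.prod_append]
  by_cases hcR : R.countP (zcell lock) = 0
  · have hcond : ¬ ((0 + ((cellsOf lock.length lock.length).countP (zcell lock) : Int))
        > 0 + (Bc.countP (fun p => zcell lock (phif i j p)) : Int)) := by omega
    rw [if_neg hcond]
    have hfR : R.filter (fun c => !zcell lock c) = R := by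
      apply List.filter_eq_self.2
      intro c hc
      have := List.countP_eq_zero.1 hcR c hc
      simpa using this
    have hdnz : ((S.filter (fun c => !zcell lock c)).map (fun c => getc lock c.1 c.2)).prod ≠ 0 := by
      apply prod_ne_zero_int
      intro v hv
      obtain ⟨c, hc, rfl⟩ := List.mem_map.1 hv
      have := (List.mem_filter.1 hc).2
      simp only [zcell, Bool.not_eq_eq_eq_not, Bool.not_true, decide_eq_false_iff_not] at this
      exact this
    have hfd : PySem.Int.floordiv
        (1 * (((cellsOf lock.length lock.length).filter (fun c => !zcell lock c)).map (fun c => getc lock c.1 c.2)).prod)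
        (1 * ((Bc.filter (fun p => !zcell lock (phif i j p))).map (fun p => getc lock (phif i j p).1 (phif i j p).2)).prod)
        = (R.map (fun c => getc lock c.1 c.2)).prod := by
      rw [one_mul, one_mul, ← hden, hnzP, hfR]
      exact Int.mul_fdiv_cancel_left _ hdnz
    rw [hfd, h1, hSmap, hRmap, one_mul]
    exact mul_comm _ _
  · have hcond : ((0 + ((cellsOf lock.length lock.length).countP (zcell lock) : Int))
        > 0 + (Bc.countP (fun p => zcell lock (phif i j p)) : Int)) := by omega
    rw [if_pos hcond, h1, hRmap]
    have hR0 : (R.map (fun c => getc lock c.1 c.2)).prod = 0 := by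
      obtain ⟨c, hc, hzc⟩ := List.countP_pos_iff.1 (Nat.pos_of_ne_zero hcR)
      apply List.prod_eq_zero
      refine List.mem_map.2 ⟨c, hc, ?_⟩
      simpa [zcell] using hzc
    rw [hR0, mul_zero]

-- ===== VERDICT (by name: the statement is the Claim_ definition above) =====
theorem is_open_spec : Claim_equal_is_open := by
  intro key lock hDom hPre
  unfold Spec_is_open
  show (PySem.List.pyRange (1 - (key.length:Int)) ((lock.length:Int) + (key.length:Int)) 1).foldl (fun tf i =>
      (PySem.List.pyRange (1 - (key.length:Int)) ((lock.length:Int) + (key.length:Int)) 1).foldl (fun tf j =>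
        tf ++ [chkA key lock i j]) tf) []
    = (PySem.List.pyRange (1 - (key.length:Int)) ((lock.length:Int) + (key.length:Int)) 1).foldl (fun res i =>
      (PySem.List.pyRange (1 - (key.length:Int)) ((lock.length:Int) + (key.length:Int)) 1).foldl (fun res j =>
        if (zpB lock).1 > (tB key lock i j).1 then res ++ [0]
        else res ++ [PySem.Int.floordiv (zpB lock).2 (tB key lock i j).2.1 * (tB key lock i j).2.2]) res) []
  refine PySem.List.foldl_congr_mem _ _ _ _ ?_
  intro acc i _
  refine PySem.List.foldl_congr_mem _ _ _ _ ?_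
  intro acc' j _
  rw [offset_eq key lock hPre i j]
  by_cases hc : (zpB lock).1 > (tB key lock i j).1
  · rw [if_pos hc, if_pos hc]
  · rw [if_neg hc, if_neg hc]
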